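-- pv_equiv track=rewrite | github.com/whistle-ch0i/SPIX | SPIX/visualization/raster.py | _collision_search_offsets
-- ===== SOURCE A (Python) =====
-- def _collision_search_offsets(max_radius: int) -> list[tuple[int, int]]:
--     radius = int(max(0, max_radius))
--     if radius <= 0:
--         return []
--     offsets: list[tuple[int, int]] = []
--     for dy in range(-radius, radius + 1):
--         for dx in range(-radius, radius + 1):
--             if dx == 0 and dy == 0:
--                 continue
--             offsets.append((int(dx), int(dy)))
--     offsets.sort(key=lambda xy: (xy[0] * xy[0] + xy[1] * xy[1], abs(xy[1]), abs(xy[0]), xy[1], xy[0]))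
--     return offsets
-- ===== SOURCE B (Python) =====
-- def _collision_search_offsets(max_radius: int) -> list[tuple[int, int]]:
--     radius = int(max(0, max_radius))
--     if radius <= 0:
--         return []
--     # counting sort: bucket the non-negative quadrant pairs (a, b) = (|dy|, |dx|)
--     # by squared distance, then expand signs in (dy, dx) order -- no comparison sort.
--     buckets = [[] for _ in range(2 * radius * radius + 1)]
--     for a in range(radius + 1):
--         for b in range(radius + 1):
--             if a == 0 and b == 0:
--                 continue
--             buckets[a * a + b * b].append((a, b))
--     offsets = []
--     for group in buckets:
--         for a, b in group:
--             for dy in ([-a, a] if a else [0]):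
--                 for dx in ([-b, b] if b else [0]):
--                     offsets.append((dx, dy))
--     return offsets
-- ===== Notes on version B (the rewrite author's own statement) =====
-- stated objective: faster
-- what changed: B replaces A's build-then-comparison-sort of every offset by a counting sort: quadrant pairs (|dy|,|dx|) are bucketed by squared distance into an indexed table and expanded sign-wise in key order, so no comparison sort runs at all.
import Mathlib
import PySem

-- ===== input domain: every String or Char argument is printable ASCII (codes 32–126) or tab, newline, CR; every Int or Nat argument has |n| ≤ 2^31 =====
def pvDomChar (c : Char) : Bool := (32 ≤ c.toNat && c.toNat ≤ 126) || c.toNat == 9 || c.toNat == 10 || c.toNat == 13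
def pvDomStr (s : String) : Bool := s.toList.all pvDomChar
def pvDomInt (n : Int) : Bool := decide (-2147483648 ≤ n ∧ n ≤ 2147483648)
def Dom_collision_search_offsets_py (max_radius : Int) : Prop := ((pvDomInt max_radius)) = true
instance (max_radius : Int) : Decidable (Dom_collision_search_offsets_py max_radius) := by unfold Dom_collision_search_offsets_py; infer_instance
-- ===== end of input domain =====

-- B replaces A's comparison sort of the offset list by a counting sort: quadrant pairs are
-- bucketed by squared distance and expanded sign-wise in key order (objective: faster, asymptotic).


-- ===== PORT A =====
-- Python's tuple sort key (d², |dy|, |dx|, dy, dx); tuple comparison is lexicographic, ported via Prod.Lex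
def pvKey (xy : Int × Int) : Int ×ₗ (Int ×ₗ (Int ×ₗ (Int ×ₗ Int))) :=
  toLex (xy.1 * xy.1 + xy.2 * xy.2, toLex (|xy.2|, toLex (|xy.1|, toLex (xy.2, xy.1))))

def collision_search_offsets_py (max_radius : Int) : List (Int × Int) :=
  let radius : Int := max 0 max_radius
  if radius ≤ 0 then []
  else
    let offsets : List (Int × Int) :=
      (PySem.List.pyRange (-radius) (radius + 1) 1).foldl (fun acc dy =>
        (PySem.List.pyRange (-radius) (radius + 1) 1).foldl (fun acc dx =>
          if dx = 0 ∧ dy = 0 then acc else acc ++ [(dx, dy)]) acc) []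
    PySem.List.sorted offsets pvKey false

-- ===== PORT B =====
def collision_search_offsets_py_alt (max_radius : Int) : List (Int × Int) :=
  let radius : Int := max 0 max_radius
  if radius ≤ 0 then []
  else
    let buckets :=
      (PySem.List.pyRange 0 (radius + 1) 1).foldl (fun bk a =>
        (PySem.List.pyRange 0 (radius + 1) 1).foldl (fun bk b =>
          if a = 0 ∧ b = 0 then bk
          else bk.modify (a * a + b * b).toNat (· ++ [(a, b)])) bk)
        (Array.replicate (2 * radius * radius + 1).toNat ([] : List (Int × Int)))
    buckets.toList.foldl (fun offsets group =>
      group.foldl (fun offsets p =>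
        (if p.1 ≠ 0 then [-p.1, p.1] else [0]).foldl (fun offsets dy =>
          (if p.2 ≠ 0 then [-p.2, p.2] else [0]).foldl (fun offsets dx =>
            offsets ++ [(dx, dy)]) offsets) offsets) offsets) []

-- ===== PRECONDITION & SPEC =====
def Spec_collision_search_offsets_py (max_radius : Int) (out : List (Int × Int)) : Prop := out = collision_search_offsets_py_alt max_radius
instance (max_radius : Int) (out : List (Int × Int)) : Decidable (Spec_collision_search_offsets_py max_radius out) := by unfold Spec_collision_search_offsets_py; infer_instance

-- ===== CLAIM (what is proved, stated in full; the proofs are below) =====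
def Claim_equal_collision_search_offsets_py : Prop := ∀ (max_radius : Int), Dom_collision_search_offsets_py max_radius → Spec_collision_search_offsets_py max_radius (collision_search_offsets_py max_radius)

-- ===== LEMMAS AND PROOFS =====

-- A's unsorted offsets list, in generation order
def pvL (R : Int) : List (Int × Int) :=
  (PySem.List.pyRange (-R) (R + 1) 1).flatMap fun dy =>
    ((PySem.List.pyRange (-R) (R + 1) 1).filter fun dx => decide ¬(dx = 0 ∧ dy = 0)).map fun dx => (dx, dy)

-- B's quadrant pairs (a, b) = (|dy|, |dx|), in generation order
def pvPairs (R : Int) : List (Int × Int) :=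
  (PySem.List.pyRange 0 (R + 1) 1).flatMap fun a =>
    ((PySem.List.pyRange 0 (R + 1) 1).filter fun b => decide ¬(a = 0 ∧ b = 0)).map fun b => (a, b)

def pvIdx (p : Int × Int) : Nat := (p.1 * p.1 + p.2 * p.2).toNat

def pvStep (bk : Array (List (Int × Int))) (p : Int × Int) : Array (List (Int × Int)) :=
  bk.modify (pvIdx p) (· ++ [p])

def pvExpand (p : Int × Int) : List (Int × Int) :=
  (if p.1 ≠ 0 then [-p.1, p.1] else [0]).flatMap fun dy =>
    (if p.2 ≠ 0 then [-p.2, p.2] else [0]).map fun dx => (dx, dy)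

-- B's output in flatMap form
def pvBO (R : Int) : List (Int × Int) :=
  (List.range (2 * R * R + 1).toNat).flatMap fun s =>
    ((pvPairs R).filter fun p => decide (pvIdx p = s)).flatMap pvExpand

lemma pvMem_pvPairs {R : Int} {p : Int × Int} :
    p ∈ pvPairs R ↔ (0 ≤ p.1 ∧ p.1 ≤ R) ∧ (0 ≤ p.2 ∧ p.2 ≤ R) ∧ ¬(p.1 = 0 ∧ p.2 = 0) := by
  obtain ⟨a, b⟩ := p
  simp [pvPairs, List.mem_flatMap, List.mem_filter, PySem.List.mem_pyRange_one, Prod.ext_iff]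
  tauto


lemma pvIdx_lt {R : Int} {p : Int × Int} (hp : p ∈ pvPairs R) : pvIdx p < (2 * R * R + 1).toNat := by
  have h := pvMem_pvPairs.mp hp
  have ha : p.1 * p.1 ≤ R * R := mul_self_le_mul_self h.1.1 h.1.2
  have hb : p.2 * p.2 ≤ R * R := mul_self_le_mul_self h.2.1.1 h.2.1.2
  have ha' : 0 ≤ p.1 * p.1 := mul_self_nonneg _
  have hb' : 0 ≤ p.2 * p.2 := mul_self_nonneg _
  unfold pvIdx
  have h2 : 2 * R * R = R * R + R * R := by ring
  omega


lemma pvA_eq (max_radius : Int) :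
    collision_search_offsets_py max_radius
      = if max 0 max_radius ≤ 0 then [] else PySem.List.sorted (pvL (max 0 max_radius)) pvKey false := by
  by_cases h : max 0 max_radius ≤ 0 <;> simp only [collision_search_offsets_py, h, if_true, if_false]
  congr 1
  have hinner : ∀ (dy : Int) (acc : List (Int × Int)),
      (PySem.List.pyRange (-(max 0 max_radius)) (max 0 max_radius + 1) 1).foldl
        (fun acc dx => if dx = 0 ∧ dy = 0 then acc else acc ++ [(dx, dy)]) acc
        = acc ++ ((PySem.List.pyRange (-(max 0 max_radius)) (max 0 max_radius + 1) 1).filter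
            fun dx => decide ¬(dx = 0 ∧ dy = 0)).map (fun dx => (dx, dy)) := by
    intro dy acc
    have hfun : (fun (acc : List (Int × Int)) (dx : Int) => if dx = 0 ∧ dy = 0 then acc else acc ++ [(dx, dy)])
        = (fun acc dx => if (fun dx => decide ¬(dx = 0 ∧ dy = 0)) dx = true then acc ++ [(dx, dy)] else acc) := by
      funext acc dx; by_cases hc : dx = 0 ∧ dy = 0 <;> simp [hc]
    rw [hfun, PySem.List.foldl_append_if]
  have houter : (fun (acc : List (Int × Int)) (dy : Int) =>
      (PySem.List.pyRange (-(max 0 max_radius)) (max 0 max_radius + 1) 1).foldl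
        (fun acc dx => if dx = 0 ∧ dy = 0 then acc else acc ++ [(dx, dy)]) acc)
      = (fun acc dy => acc ++ ((PySem.List.pyRange (-(max 0 max_radius)) (max 0 max_radius + 1) 1).filter
            fun dx => decide ¬(dx = 0 ∧ dy = 0)).map (fun dx => (dx, dy))) := by
    funext acc dy; exact hinner dy acc
  rw [houter, PySem.List.foldl_append_eq_flatMap, List.nil_append, pvL]

lemma pvSize_foldl (xs : List (Int × Int)) (arr : Array (List (Int × Int))) :
    (xs.foldl pvStep arr).size = arr.size := by
  induction xs generalizing arr with
  | nil => rfl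
  | cons p xs ih => simp [List.foldl_cons, ih, pvStep, Array.size_modify]

lemma pvGet_foldl (xs : List (Int × Int)) (arr : Array (List (Int × Int)))
    (h : ∀ p ∈ xs, pvIdx p < arr.size) (s : Nat) :
    (xs.foldl pvStep arr)[s]?
      = (arr[s]?).map (· ++ xs.filter (fun p => decide (pvIdx p = s))) := by
  induction xs generalizing arr with
  | nil => simp
  | cons p xs ih =>
    have hp : pvIdx p < arr.size := h p (List.mem_cons_self)
    have h' : ∀ q ∈ xs, pvIdx q < (pvStep arr p).size := by
      intro q hq; rw [pvStep, Array.size_modify]; exact h q (List.mem_cons_of_mem _ hq)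
    rw [List.foldl_cons, ih (pvStep arr p) h']
    have hget : (pvStep arr p)[s]? = if pvIdx p = s then (arr[s]?).map (· ++ [p]) else arr[s]? := by
      rw [pvStep, Array.getElem?_modify]
    rw [hget, List.filter_cons]
    cases harr : arr[s]? <;> by_cases hc : pvIdx p = s <;>
      simp [hc, List.append_assoc]

lemma pvB_eq (max_radius : Int) :
    collision_search_offsets_py_alt max_radius
      = if max 0 max_radius ≤ 0 then [] else pvBO (max 0 max_radius) := by
  by_cases h : max 0 max_radius ≤ 0 <;> simp only [collision_search_offsets_py_alt, h, if_true, if_false]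
  set R := max 0 max_radius with hR
  -- 1. the bucket-filling fold is a fold of pvStep over pvPairs R
  have hbinner : ∀ (a : Int) (bk : Array (List (Int × Int))),
      (PySem.List.pyRange 0 (R + 1) 1).foldl
        (fun bk b => if a = 0 ∧ b = 0 then bk else bk.modify (a * a + b * b).toNat (· ++ [(a, b)])) bk
      = (((PySem.List.pyRange 0 (R + 1) 1).filter fun b => decide ¬(a = 0 ∧ b = 0)).map fun b => (a, b)).foldl pvStep bk := by
    intro a bk
    rw [List.foldl_map, List.foldl_filter]
    congr 1
    funext bk' b
    by_cases hc : a = 0 ∧ b = 0 <;> simp [hc, pvStep, pvIdx]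
  have hbuckets : (PySem.List.pyRange 0 (R + 1) 1).foldl (fun bk a =>
        (PySem.List.pyRange 0 (R + 1) 1).foldl
          (fun bk b => if a = 0 ∧ b = 0 then bk else bk.modify (a * a + b * b).toNat (· ++ [(a, b)])) bk)
        (Array.replicate (2 * R * R + 1).toNat ([] : List (Int × Int)))
      = (pvPairs R).foldl pvStep (Array.replicate (2 * R * R + 1).toNat ([] : List (Int × Int))) := by
    have hfun2 : (fun (bk : Array (List (Int × Int))) (a : Int) =>
        (PySem.List.pyRange 0 (R + 1) 1).foldl
          (fun bk b => if a = 0 ∧ b = 0 then bk else bk.modify (a * a + b * b).toNat (· ++ [(a, b)])) bk)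
        = (fun bk a => (((PySem.List.pyRange 0 (R + 1) 1).filter fun b => decide ¬(a = 0 ∧ b = 0)).map fun b => (a, b)).foldl pvStep bk) := by
      funext bk a; exact hbinner a bk
    rw [hfun2, ← List.foldl_flatMap, pvPairs]
  rw [hbuckets]
  -- 2. the bucket array, as a list, is the list of distance classes
  have hidx : ∀ p ∈ pvPairs R, pvIdx p < (Array.replicate (2 * R * R + 1).toNat ([] : List (Int × Int))).size := by
    intro p hp
    rw [Array.size_replicate]
    exact pvIdx_lt hp
  have htoList : ((pvPairs R).foldl pvStep (Array.replicate (2 * R * R + 1).toNat ([] : List (Int × Int)))).toList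
      = (List.range (2 * R * R + 1).toNat).map (fun s => (pvPairs R).filter fun p => decide (pvIdx p = s)) := by
    apply List.ext_getElem
    · simp [Array.length_toList, pvSize_foldl]
    · intro i h1 h2
      rw [Array.getElem_toList, List.getElem_map, List.getElem_range]
      have hi : i < (Array.replicate (2 * R * R + 1).toNat ([] : List (Int × Int))).size := by
        simpa [pvSize_foldl] using h1
      have := pvGet_foldl (pvPairs R) _ hidx i
      rw [Array.getElem?_eq_getElem hi, Array.getElem_replicate, Option.map_some, List.nil_append] at this
      have h3 := Array.getElem?_eq_getElem (xs := (pvPairs R).foldl pvStep (Array.replicate (2 * R * R + 1).toNat ([] : List (Int × Int)))) (i := i) (by rwa [pvSize_foldl])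
      rw [this] at h3
      exact Option.some_injective _ h3.symm
  -- 3. flatten
  rw [htoList]
  simp only [PySem.List.foldl_append_singleton_eq_map, PySem.List.foldl_append_eq_flatMap, List.nil_append]
  rw [List.flatMap_map, pvBO]
  rfl

lemma pvKey_lt_iff (u v : Int × Int) :
    pvKey u < pvKey v ↔
      (u.1 * u.1 + u.2 * u.2 < v.1 * v.1 + v.2 * v.2) ∨
      (u.1 * u.1 + u.2 * u.2 = v.1 * v.1 + v.2 * v.2 ∧
        (|u.2| < |v.2| ∨ (|u.2| = |v.2| ∧
          (|u.1| < |v.1| ∨ (|u.1| = |v.1| ∧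
            (u.2 < v.2 ∨ (u.2 = v.2 ∧ u.1 < v.1))))))) := by
  simp [pvKey, Prod.Lex.toLex_lt_toLex]

lemma pvMem_pvL {R : Int} {y : Int × Int} :
    y ∈ pvL R ↔ (-R ≤ y.1 ∧ y.1 ≤ R) ∧ (-R ≤ y.2 ∧ y.2 ≤ R) ∧ ¬(y.1 = 0 ∧ y.2 = 0) := by
  obtain ⟨x, z⟩ := y
  simp [pvL, List.mem_flatMap, List.mem_filter, PySem.List.mem_pyRange_one, Prod.ext_iff]
  tauto

lemma pvMem_pvExpand {p y : Int × Int} (h1 : 0 ≤ p.1) (h2 : 0 ≤ p.2) :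
    y ∈ pvExpand p ↔ |y.2| = p.1 ∧ |y.1| = p.2 := by
  obtain ⟨a, b⟩ := p
  obtain ⟨x, z⟩ := y
  simp only at h1 h2 ⊢
  rw [abs_eq h1, abs_eq h2]
  by_cases ha : a = 0 <;> by_cases hb : b = 0 <;>
    simp [pvExpand, ha, hb, Prod.ext_iff] <;> tauto

lemma pvNodup_flatMap_tag {α β : Type} (l : List α) (f : α → List β) (tag : β → α)
    (hl : l.Pairwise (· ≠ ·)) (hf : ∀ x ∈ l, (f x).Nodup)
    (ht : ∀ x ∈ l, ∀ y ∈ f x, tag y = x) : (l.flatMap f).Nodup := by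
  rw [List.nodup_flatMap]
  refine ⟨hf, ?_⟩
  refine (List.pairwise_iff_forall_sublist.mpr ?_)
  intro x x' hsub
  have hx : x ∈ l := hsub.subset (by simp)
  have hx' : x' ∈ l := hsub.subset (by simp)
  have hne : x ≠ x' := List.pairwise_iff_forall_sublist.mp hl hsub
  intro y hy hy'
  exact hne ((ht x hx y hy).symm.trans (ht x' hx' y hy'))

lemma pvNodup_pvL (R : Int) : (pvL R).Nodup := by
  apply pvNodup_flatMap_tag _ _ (fun y => y.2)
  · exact (PySem.List.pairwise_lt_pyRange_one _ _).imp ne_of_lt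
  · intro dy _
    exact ((PySem.List.nodup_pyRange_one _ _).filter _).map (fun a b h => by
      simpa [Prod.ext_iff] using h)
  · intro dy _ y hy
    simp only [List.mem_map] at hy
    obtain ⟨dx, _, rfl⟩ := hy
    rfl

lemma pvNodup_pvPairs (R : Int) : (pvPairs R).Nodup := by
  apply pvNodup_flatMap_tag _ _ (fun p => p.1)
  · exact (PySem.List.pairwise_lt_pyRange_one _ _).imp ne_of_lt
  · intro a _
    exact ((PySem.List.nodup_pyRange_one _ _).filter _).map (fun x y h => by
      simpa [Prod.ext_iff] using h)
  · intro a _ p hp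
    simp only [List.mem_map] at hp
    obtain ⟨b, _, rfl⟩ := hp
    rfl

lemma pvNodup_pvExpand {p : Int × Int} (h1 : 0 ≤ p.1) (h2 : 0 ≤ p.2) : (pvExpand p).Nodup := by
  obtain ⟨a, b⟩ := p
  simp only at h1 h2
  by_cases ha : a = 0 <;> by_cases hb : b = 0 <;>
    simp [pvExpand, ha, hb, Prod.ext_iff] <;> omega

lemma pvNodup_expandAll (R : Int) : ((pvPairs R).flatMap pvExpand).Nodup := by
  apply pvNodup_flatMap_tag _ _ (fun y => (|y.2|, |y.1|))
  · exact pvNodup_pvPairs R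
  · intro p hp
    have := pvMem_pvPairs.mp hp
    exact pvNodup_pvExpand this.1.1 this.2.1.1
  · intro p hp y hy
    have h := pvMem_pvPairs.mp hp
    have := (pvMem_pvExpand h.1.1 h.2.1.1).mp hy
    simp [this.1, this.2]

lemma pvSum_ite (n : Nat) (k : Nat) (c : Nat) (h : k < n) :
    ((List.range n).map (fun s => if k = s then c else 0)).sum = c := by
  induction n with
  | zero => omega
  | succ m ih =>
    rw [List.range_succ, List.map_append, List.sum_append]
    by_cases hk : k = m
    · subst hk
      have : ∀ s ∈ List.range k, (if k = s then c else 0) = 0 := by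
        intro s hs; rw [List.mem_range] at hs; simp [Nat.ne_of_gt hs]
      rw [List.map_congr_left this]
      simp
    · have hk' : k < m := by omega
      simp [ih hk', hk]

-- counting-sort partition: flattening the buckets permutes the bucketed list
lemma pvPerm_partition {α : Type} [DecidableEq α] (n : Nat) (xs : List α) (idx : α → Nat)
    (h : ∀ x ∈ xs, idx x < n) :
    ((List.range n).flatMap fun s => xs.filter fun x => decide (idx x = s)).Perm xs := by
  rw [List.perm_iff_count]
  intro y
  rw [List.count_flatMap]
  by_cases hy : y ∈ xs
  · have hc : ∀ s : Nat, (List.count y ∘ fun s => xs.filter fun x => decide (idx x = s)) s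
        = if idx y = s then List.count y xs else 0 := by
      intro s
      by_cases hs : idx y = s
      · simp only [Function.comp, hs, if_true]
        rw [List.count_filter (by simp [hs])]
      · simp only [Function.comp, if_neg hs]
        refine List.count_eq_zero.mpr ?_
        simp [List.mem_filter, hs]
    rw [List.map_congr_left (fun s _ => hc s)]
    exact pvSum_ite n (idx y) _ (h y hy)
  · rw [List.count_eq_zero.mpr hy]
    refine List.sum_eq_zero ?_
    intro c hc
    simp only [List.mem_map, Function.comp] at hc
    obtain ⟨s, _, rfl⟩ := hc
    refine List.count_eq_zero.mpr ?_
    simp [List.mem_filter]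
    intro h'; exact absurd h' hy

lemma pvPerm (R : Int) : (pvBO R).Perm (pvL R) := by
  rw [pvBO, ← List.flatMap_assoc]
  refine List.Perm.trans (l₂ := (pvPairs R).flatMap pvExpand)
    ((pvPerm_partition _ (pvPairs R) pvIdx (fun p hp => pvIdx_lt hp)).flatMap
      (fun a _ => List.Perm.refl _)) ?_
  rw [List.perm_ext_iff_of_nodup (pvNodup_expandAll R) (pvNodup_pvL R)]
  intro y
  rw [List.mem_flatMap, pvMem_pvL]
  constructor
  · rintro ⟨p, hp, hy⟩
    have h := pvMem_pvPairs.mp hp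
    have he := (pvMem_pvExpand h.1.1 h.2.1.1).mp hy
    have hx : |y.1| ≤ R := he.2 ▸ h.2.1.2
    have hz : |y.2| ≤ R := he.1 ▸ h.1.2
    rw [abs_le] at hx hz
    refine ⟨hx, hz, ?_⟩
    rintro ⟨hx0, hz0⟩
    exact h.2.2 ⟨by rw [← he.1, hz0]; simp, by rw [← he.2, hx0]; simp⟩
  · rintro ⟨hx, hz, h0⟩
    refine ⟨(|y.2|, |y.1|), pvMem_pvPairs.mpr ⟨⟨abs_nonneg _, abs_le.mpr hz⟩, ⟨abs_nonneg _, abs_le.mpr hx⟩, ?_⟩, ?_⟩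
    · rintro ⟨h1, h2⟩
      rw [abs_eq_zero] at h1 h2
      exact h0 ⟨h2, h1⟩
    · exact (pvMem_pvExpand (abs_nonneg _) (abs_nonneg _)).mpr ⟨rfl, rfl⟩

lemma pvPairs_pairwise (R : Int) :
    (pvPairs R).Pairwise (fun p q => p.1 < q.1 ∨ (p.1 = q.1 ∧ p.2 < q.2)) := by
  rw [pvPairs, List.pairwise_flatMap]
  constructor
  · intro a _
    rw [List.pairwise_map]
    exact ((PySem.List.pairwise_lt_pyRange_one _ _).filter _).imp (fun h => Or.inr ⟨rfl, h⟩)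
  · refine (PySem.List.pairwise_lt_pyRange_one _ _).imp ?_
    intro a a' hlt u hu v hv
    simp only [List.mem_map] at hu hv
    obtain ⟨b, _, rfl⟩ := hu
    obtain ⟨b', _, rfl⟩ := hv
    exact Or.inl hlt

lemma pvExpand_pairwise {p : Int × Int} (h1 : 0 ≤ p.1) (h2 : 0 ≤ p.2) :
    (pvExpand p).Pairwise (fun u v => pvKey u < pvKey v) := by
  obtain ⟨a, b⟩ := p
  simp only at h1 h2
  by_cases ha : a = 0 <;> by_cases hb : b = 0
  · subst ha; subst hb; simp [pvExpand]
  · subst ha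
    have : pvExpand (0, b) = [(-b, 0), (b, 0)] := by simp [pvExpand, hb]
    rw [this]
    refine List.Pairwise.cons ?_ (by simp)
    intro v hv
    rw [List.mem_singleton] at hv
    subst hv
    rw [pvKey_lt_iff]
    exact Or.inr ⟨by ring, Or.inr ⟨rfl, Or.inr ⟨by rw [abs_neg], Or.inr ⟨rfl, by omega⟩⟩⟩⟩
  · subst hb
    have ha' : 0 < a := lt_of_le_of_ne h1 (Ne.symm ha)
    have : pvExpand (a, 0) = [(0, -a), (0, a)] := by simp [pvExpand, ha]
    rw [this]
    refine List.Pairwise.cons ?_ (by simp)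
    intro v hv
    rw [List.mem_singleton] at hv
    subst hv
    rw [pvKey_lt_iff]
    exact Or.inr ⟨by ring, Or.inr ⟨by rw [abs_neg], Or.inr ⟨rfl, Or.inl (by omega)⟩⟩⟩
  · have ha' : 0 < a := lt_of_le_of_ne h1 (Ne.symm ha)
    have hb' : 0 < b := lt_of_le_of_ne h2 (Ne.symm hb)
    have : pvExpand (a, b) = [(-b, -a), (b, -a), (-b, a), (b, a)] := by simp [pvExpand, ha, hb]
    rw [this]
    have k12 : pvKey (-b, -a) < pvKey (b, -a) := by
      rw [pvKey_lt_iff]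
      exact Or.inr ⟨by ring, Or.inr ⟨rfl, Or.inr ⟨by rw [abs_neg], Or.inr ⟨rfl, by omega⟩⟩⟩⟩
    have k13 : pvKey (-b, -a) < pvKey (-b, a) := by
      rw [pvKey_lt_iff]
      exact Or.inr ⟨by ring, Or.inr ⟨by rw [abs_neg], Or.inr ⟨rfl, Or.inl (by omega)⟩⟩⟩
    have k14 : pvKey (-b, -a) < pvKey (b, a) := by
      rw [pvKey_lt_iff]
      exact Or.inr ⟨by ring, Or.inr ⟨by rw [abs_neg], Or.inr ⟨by rw [abs_neg], Or.inl (by omega)⟩⟩⟩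
    have k23 : pvKey (b, -a) < pvKey (-b, a) := by
      rw [pvKey_lt_iff]
      exact Or.inr ⟨by ring, Or.inr ⟨by rw [abs_neg], Or.inr ⟨by rw [abs_neg], Or.inl (by omega)⟩⟩⟩
    have k24 : pvKey (b, -a) < pvKey (b, a) := by
      rw [pvKey_lt_iff]
      exact Or.inr ⟨by ring, Or.inr ⟨by rw [abs_neg], Or.inr ⟨rfl, Or.inl (by omega)⟩⟩⟩
    have k34 : pvKey (-b, a) < pvKey (b, a) := by
      rw [pvKey_lt_iff]
      exact Or.inr ⟨by ring, Or.inr ⟨rfl, Or.inr ⟨by rw [abs_neg], Or.inr ⟨rfl, by omega⟩⟩⟩⟩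
    refine List.Pairwise.cons ?_ (List.Pairwise.cons ?_ (List.Pairwise.cons ?_ (by simp)))
    · intro v hv
      simp only [List.mem_cons, List.not_mem_nil, or_false] at hv
      rcases hv with rfl | rfl | rfl
      exacts [k12, k13, k14]
    · intro v hv
      simp only [List.mem_cons, List.not_mem_nil, or_false] at hv
      rcases hv with rfl | rfl
      exacts [k23, k24]
    · intro v hv
      rw [List.mem_singleton] at hv
      subst hv
      exact k34

lemma pvD2_of_mem {R : Int} {s : Nat} {p u : Int × Int} (hp : p ∈ pvPairs R)
    (hps : pvIdx p = s) (hu : u ∈ pvExpand p) :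
    |u.2| = p.1 ∧ |u.1| = p.2 ∧ u.1 * u.1 + u.2 * u.2 = (s : Int) := by
  have h := pvMem_pvPairs.mp hp
  have he := (pvMem_pvExpand h.1.1 h.2.1.1).mp hu
  refine ⟨he.1, he.2, ?_⟩
  have e1 : u.1 * u.1 = p.2 * p.2 := by rw [← abs_mul_abs_self u.1, he.2]
  have e2 : u.2 * u.2 = p.1 * p.1 := by rw [← abs_mul_abs_self u.2, he.1]
  have h0 : 0 ≤ p.1 * p.1 + p.2 * p.2 := add_nonneg (mul_self_nonneg _) (mul_self_nonneg _)
  have hval : p.1 * p.1 + p.2 * p.2 = (s : Int) := by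
    rw [← hps, pvIdx, Int.toNat_of_nonneg h0]
  rw [e1, e2, add_comm]
  exact hval

lemma pvPairwise (R : Int) : (pvBO R).Pairwise (fun u v => pvKey u < pvKey v) := by
  rw [pvBO, List.pairwise_flatMap]
  constructor
  · intro s _
    rw [List.pairwise_flatMap]
    constructor
    · intro p hp
      have h := pvMem_pvPairs.mp (List.mem_of_mem_filter hp)
      exact pvExpand_pairwise h.1.1 h.2.1.1
    · refine List.Pairwise.imp_of_mem ?_ ((pvPairs_pairwise R).filter _)
      intro p q hpmem hqmem hplt u hu v hv
      have hpf := List.mem_filter.mp hpmem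
      have hqf := List.mem_filter.mp hqmem
      have hps : pvIdx p = s := by simpa using hpf.2
      have hqs : pvIdx q = s := by simpa using hqf.2
      have du := pvD2_of_mem hpf.1 hps hu
      have dv := pvD2_of_mem hqf.1 hqs hv
      rw [pvKey_lt_iff]
      right
      refine ⟨by rw [du.2.2, dv.2.2], ?_⟩
      rw [du.1, dv.1, du.2.1, dv.2.1]
      rcases hplt with h' | ⟨hfst, hsnd⟩
      · exact Or.inl h'
      · exact Or.inr ⟨hfst, Or.inl hsnd⟩
  · refine List.Pairwise.imp ?_ List.pairwise_lt_range
    intro s t hst u hu v hv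
    obtain ⟨p, hpf, hu'⟩ := List.mem_flatMap.mp hu
    obtain ⟨q, hqf, hv'⟩ := List.mem_flatMap.mp hv
    have hpm := List.mem_filter.mp hpf
    have hqm := List.mem_filter.mp hqf
    have hps : pvIdx p = s := by simpa using hpm.2
    have hqs : pvIdx q = t := by simpa using hqm.2
    have du := pvD2_of_mem hpm.1 hps hu'
    have dv := pvD2_of_mem hqm.1 hqs hv'
    rw [pvKey_lt_iff]
    left
    rw [du.2.2, dv.2.2]
    exact_mod_cast hst

-- ===== VERDICT (by name: the statement is the Claim_ definition above) =====
theorem collision_search_offsets_py_spec : Claim_equal_collision_search_offsets_py := by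
  intro max_radius _
  unfold Spec_collision_search_offsets_py
  rw [pvA_eq, pvB_eq]
  by_cases h : max 0 max_radius ≤ 0
  · simp [h]
  · rw [if_neg h, if_neg h]
    exact PySem.List.sorted_eq_of_perm_of_pairwise_lt _ _ pvKey (pvPerm _) (pvPairwise _)
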